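-- pv_equiv track=rewrite | github.com/SJTU-dxw/AN-Net | data_process.py | bigram_generation
-- ===== SOURCE A (Python) =====
-- def cut_origin(obj, sec):
--     result = [obj[i:i + sec] for i in range(0, len(obj), sec)]
--     try:
--         remanent_count = len(result[0]) % 4
--     except Exception as e:
--         remanent_count = 0
--     if remanent_count == 0:
--         pass
--     else:
--         result = [obj[i:i + sec + remanent_count] for i in range(0, len(obj), sec + remanent_count)]
--     return result
--
-- def bigram_generation(packet_datagram, packet_len=64, flag=True):
--     result = []
--     generated_datagram = cut_origin(packet_datagram, 1)
--     token_count = 0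
--     for sub_string_index in range(len(generated_datagram)):
--         if sub_string_index != (len(generated_datagram) - 1):
--             token_count += 1
--             if token_count > packet_len:
--                 break
--             else:
--                 merge_word_bigram = generated_datagram[sub_string_index] + generated_datagram[sub_string_index + 1]
--         else:
--             break
--         result.append(merge_word_bigram)
--
--     return result
-- ===== SOURCE B (Python) =====
-- def bigram_generation(packet_datagram, packet_len=64, flag=True):
--     count = min((len(packet_datagram) + 1) // 2 - 1, packet_len)
--     return [packet_datagram[2 * i:2 * i + 4] for i in range(max(count, 0))]
-- ===== Notes on version B (the rewrite author's own statement) =====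
-- stated objective: simpler
-- what changed: Drops cut_origin and the index/break loop entirely: the number of bigrams is computed in closed form as min((len+1)//2 - 1, packet_len) clamped to 0, and each bigram is read directly as the width-4 stride-2 slice packet_datagram[2*i:2*i+4].
import Mathlib
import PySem

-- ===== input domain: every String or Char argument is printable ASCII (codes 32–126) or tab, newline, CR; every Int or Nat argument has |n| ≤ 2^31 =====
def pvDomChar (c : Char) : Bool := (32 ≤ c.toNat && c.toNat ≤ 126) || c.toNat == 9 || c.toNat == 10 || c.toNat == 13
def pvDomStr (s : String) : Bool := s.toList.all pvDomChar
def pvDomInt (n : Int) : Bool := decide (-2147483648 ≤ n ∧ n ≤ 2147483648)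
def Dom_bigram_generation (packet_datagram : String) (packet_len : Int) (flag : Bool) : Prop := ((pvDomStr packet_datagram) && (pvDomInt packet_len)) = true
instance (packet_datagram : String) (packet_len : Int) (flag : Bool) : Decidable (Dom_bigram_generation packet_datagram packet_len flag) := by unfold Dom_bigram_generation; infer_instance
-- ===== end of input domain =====

-- B replaces cut_origin + the index/break loop by a closed-form bigram count and direct stride-2 width-4 slices (objective: simpler).

-- ===== PORT A =====
-- cut_origin(obj, sec): chunk list; the try/except around result[0] is ported as a match on result[0]? (none = IndexError → 0)
def cut_origin (obj : List Char) (sec : Int) : List (List Char) :=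
  let result := (PySem.List.pyRange 0 (PySem.List.len obj) sec).map
    (fun i => PySem.List.slice obj (some i) (some (i + sec)))
  let remanent_count : Int :=
    match result.head? with
    | some c => PySem.Int.mod (PySem.List.len c) 4
    | none => 0
  if remanent_count = (0 : Int) then result
  else (PySem.List.pyRange 0 (PySem.List.len obj) (sec + remanent_count)).map
    (fun i => PySem.List.slice obj (some i) (some (i + sec + remanent_count)))

-- the for/break loop of bigram_generation, recursing on the remaining range(len(generated_datagram)) indices
-- (gd[i] is in range whenever read, so pyGetD with default [] is exact)
def bgLoop (gd : List (List Char)) (packet_len : Int) (token_count : Int) : List Int → List (List Char)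
  | [] => []
  | i :: rest =>
    if i ≠ PySem.List.len gd - 1 then
      if token_count + 1 > packet_len then []
      else (PySem.List.pyGetD gd i [] ++ PySem.List.pyGetD gd (i + 1) []) ::
           bgLoop gd packet_len (token_count + 1) rest
    else []

def bigram_generation (packet_datagram : String) (packet_len : Int) (flag : Bool) : List String :=
  let gd := cut_origin packet_datagram.toList 1
  (bgLoop gd packet_len 0 (PySem.List.pyRange 0 (PySem.List.len gd) 1)).map String.ofList

-- ===== PORT B =====
def bigram_generation_alt (packet_datagram : String) (packet_len : Int) (flag : Bool) : List String :=
  let cs := packet_datagram.toList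
  let count := min (PySem.Int.floordiv (PySem.List.len cs + 1) 2 - 1) packet_len
  (PySem.List.pyRange 0 (max count 0) 1).map
    (fun i => String.ofList (PySem.List.slice cs (some (2 * i)) (some (2 * i + 4))))

-- ===== PRECONDITION & SPEC =====
def Spec_bigram_generation (packet_datagram : String) (packet_len : Int) (flag : Bool) (out : List String) : Prop := out = bigram_generation_alt packet_datagram packet_len flag
instance (packet_datagram : String) (packet_len : Int) (flag : Bool) (out : List String) : Decidable (Spec_bigram_generation packet_datagram packet_len flag out) := by unfold Spec_bigram_generation; infer_instance

-- ===== CLAIM (what is proved, stated in full; the proofs are below) =====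
def Claim_equal_bigram_generation : Prop := ∀ (packet_datagram : String) (packet_len : Int) (flag : Bool), Dom_bigram_generation packet_datagram packet_len flag → Spec_bigram_generation packet_datagram packet_len flag (bigram_generation packet_datagram packet_len flag)

-- ===== LEMMAS AND PROOFS =====

-- two adjacent 2-wide slices concatenate to one 4-wide slice
lemma pair_slice (cs : List Char) (j : Nat) :
    PySem.List.slice cs (some (j : Int)) (some ((j : Int) + 2)) ++
      PySem.List.slice cs (some ((j : Int) + 2)) (some ((j : Int) + 4)) =
    PySem.List.slice cs (some (j : Int)) (some ((j : Int) + 4)) := by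
  have h2 : ((j : Int) + 2) = ((j + 2 : Nat) : Int) := by push_cast; ring
  have h4 : ((j : Int) + 4) = ((j + 4 : Nat) : Int) := by push_cast; ring
  rw [h2, h4, PySem.List.slice_natCast, PySem.List.slice_natCast, PySem.List.slice_natCast]
  have e2 : j + 2 - j = 2 := by omega
  have e2' : j + 4 - (j + 2) = 2 := by omega
  have e4 : j + 4 - j = 4 := by omega
  rw [e2, e2', e4, ← List.drop_drop]
  have : (4 : Nat) = 2 + 2 := by omega
  rw [this, List.take_add]

-- the loop emits pairs while the index is below len-1 and the token budget lasts
lemma bgLoop_eq (gd : List (List Char)) (pl : Int) :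
    ∀ (k : Nat) (a tc : Int), 0 ≤ a → (gd.length : Int) - a ≤ k →
      bgLoop gd pl tc (PySem.List.pyRange a (PySem.List.len gd) 1) =
      (PySem.List.pyRange a (min ((gd.length : Int) - 1) (a + (pl - tc))) 1).map
        (fun i => PySem.List.pyGetD gd i [] ++ PySem.List.pyGetD gd (i + 1) []) := by
  intro k
  induction k with
  | zero =>
    intro a tc ha hk
    rw [PySem.List.len_eq, PySem.List.pyRange_one_eq_nil (by omega),
        PySem.List.pyRange_one_eq_nil (by omega)]
    rfl
  | succ k ih =>
    intro a tc ha hk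
    rw [PySem.List.len_eq]
    by_cases hab : a < (gd.length : Int)
    · rw [PySem.List.pyRange_one_cons hab]
      show bgLoop gd pl tc _ = _
      unfold bgLoop
      by_cases hlast : a = (gd.length : Int) - 1
      · simp only [PySem.List.len_eq, hlast, ne_eq, not_true_eq_false, if_false]
        rw [PySem.List.pyRange_one_eq_nil (by omega)]
        rfl
      · simp only [PySem.List.len_eq, ne_eq, hlast, not_false_eq_true, if_true]
        by_cases hbudget : tc + 1 > pl
        · simp only [hbudget, if_true]
          rw [PySem.List.pyRange_one_eq_nil (by omega)]
          rfl
        · simp only [hbudget, if_false]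
          have hrec := ih (a + 1) (tc + 1) (by omega) (by omega)
          rw [PySem.List.len_eq] at hrec
          rw [hrec]
          have hlt : a < min ((gd.length : Int) - 1) (a + (pl - tc)) := by omega
          rw [PySem.List.pyRange_one_cons hlt, List.map_cons]
          have : min ((gd.length : Int) - 1) (a + 1 + (pl - (tc + 1))) =
                 min ((gd.length : Int) - 1) (a + (pl - tc)) := by omega
          rw [this]
    · rw [PySem.List.pyRange_one_eq_nil (by omega),
          PySem.List.pyRange_one_eq_nil (by omega)]
      rfl

-- cut_origin on a nonempty string with sec = 1 yields the 2-wide chunks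
lemma cut_origin_cons (c : Char) (rest : List Char) :
    cut_origin (c :: rest) 1 =
      (List.range (((c :: rest).length + 1) / 2)).map
        (fun k => PySem.List.slice (c :: rest) (some ((2 * k : Nat) : Int)) (some (((2 * k : Nat) : Int) + 2))) := by
  unfold cut_origin
  dsimp only
  have hn : (0 : Int) < PySem.List.len (c :: rest) := by
    rw [PySem.List.len_eq]; exact_mod_cast Nat.succ_pos rest.length
  rw [PySem.List.pyRange_one_cons hn, List.map_cons, List.head?_cons]
  dsimp only
  have hslice : PySem.List.slice (c :: rest) (some 0) (some (0 + 1)) = [c] := by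
    rw [PySem.List.slice_toNat (c :: rest) (by omega) (by omega)]
    rfl
  rw [hslice]
  have hone : PySem.Int.mod (PySem.List.len [c]) 4 = 1 := by
    rw [PySem.List.len_eq]
    dsimp only [List.length_cons, List.length_nil]
    decide
  simp only [hone]
  rw [if_neg (by decide : ¬ (1 : Int) = 0)]
  rw [PySem.List.len_eq]
  rw [PySem.List.pyRange_of_pos 0 (((c :: rest).length : Int)) (by decide : (0:Int) < 1 + 1)]
  rw [if_pos (by exact_mod_cast Nat.succ_pos rest.length : (0:Int) < ((c::rest).length : Int))]
  have hM : ((((c :: rest).length : Int) - 0 + (1 + 1) - 1) / (1 + 1)).toNat = ((c :: rest).length + 1) / 2 := by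
    omega
  rw [hM, List.map_map]
  apply List.map_congr_left
  intro k _
  dsimp only [Function.comp]
  have e2 : (0 : Int) + (1 + 1) * (k : Int) + 1 + 1 = ((2 * k : Nat) : Int) + 2 := by push_cast; ring
  have e1 : (0 : Int) + (1 + 1) * (k : Int) = ((2 * k : Nat) : Int) := by push_cast; ring
  rw [e2, e1]

-- the whole equivalence, on the character list
lemma main_chars (cs : List Char) (pl : Int) :
    (bgLoop (cut_origin cs 1) pl 0 (PySem.List.pyRange 0 (PySem.List.len (cut_origin cs 1)) 1)).map String.ofList =
    (PySem.List.pyRange 0 (max (min (PySem.Int.floordiv (PySem.List.len cs + 1) 2 - 1) pl) 0) 1).map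
      (fun i => String.ofList (PySem.List.slice cs (some (2 * i)) (some (2 * i + 4)))) := by
  cases cs with
  | nil =>
    have h1 : cut_origin [] 1 = [] := by rfl
    rw [h1]
    have h2 : PySem.Int.floordiv (PySem.List.len ([] : List Char) + 1) 2 - 1 = -1 := by decide
    rw [h2]
    have h3 : max (min (-1 : Int) pl) 0 = 0 := by omega
    rw [h3]
    rfl
  | cons c rest =>
    set M : Nat := ((c :: rest).length + 1) / 2 with hMdef
    clear_value M
    have hcut := cut_origin_cons c rest
    rw [← hMdef] at hcut
    have hlen : (cut_origin (c :: rest) 1).length = M := by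
      rw [hcut, List.length_map, List.length_range]
    rw [bgLoop_eq (cut_origin (c :: rest) 1) pl (cut_origin (c :: rest) 1).length 0 0 le_rfl (by omega)]
    rw [hlen]
    -- right-hand bound
    have hfl : PySem.Int.floordiv (PySem.List.len (c :: rest) + 1) 2 - 1 = (M : Int) - 1 := by
      rw [PySem.List.len_eq]
      rw [PySem.Int.floordiv_eq_ediv_of_pos (by omega)]
      omega
    rw [hfl]
    -- both ranges have the same (clamped) bound
    have hbound : PySem.List.pyRange 0 (max (min ((M : Int) - 1) pl) 0) 1 =
        PySem.List.pyRange 0 (min ((M : Int) - 1) (0 + (pl - 0))) 1 := by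
      have hb2 : (max (min ((M : Int) - 1) pl) 0 - 0).toNat = (min ((M : Int) - 1) (0 + (pl - 0)) - 0).toNat := by
        omega
      rw [PySem.List.pyRange_one, PySem.List.pyRange_one, hb2]
    rw [← hbound, List.map_map, PySem.List.pyRange_one]
    simp only [List.map_map]
    apply List.map_congr_left
    intro k hk
    have hkM : k < (max (min ((M : Int) - 1) pl) 0).toNat := by
      simpa using List.mem_range.mp hk
    have hk1 : k + 1 < M := by omega
    simp only [Function.comp, zero_add]
    -- resolve the two pyGetD lookups in the chunk list
    have hget : ∀ (j : Nat), j < M →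
        PySem.List.pyGetD (cut_origin (c :: rest) 1) (j : Int) [] =
        PySem.List.slice (c :: rest) (some ((2 * j : Nat) : Int)) (some (((2 * j : Nat) : Int) + 2)) := by
      intro j hj
      rw [hcut, PySem.List.pyGetD_natCast, List.getD_eq_getElem?_getD, List.getElem?_map,
          List.getElem?_range hj]
      rfl
    have hcast : ((k : Int) + 1) = ((k + 1 : Nat) : Int) := by push_cast; ring
    rw [hget k (by omega), hcast, hget (k + 1) (by omega)]
    have h22 : ((2 * (k + 1) : Nat) : Int) = ((2 * k : Nat) : Int) + 2 := by push_cast; ring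
    rw [h22]
    have h24 : ((2 * k : Nat) : Int) + 2 + 2 = ((2 * k : Nat) : Int) + 4 := by ring
    rw [h24, pair_slice]
    have h2k : (2 : Int) * (k : Int) = ((2 * k : Nat) : Int) := by push_cast; ring
    rw [h2k]

-- ===== VERDICT (by name: the statement is the Claim_ definition above) =====
theorem bigram_generation_spec : Claim_equal_bigram_generation := by
  intro packet_datagram packet_len flag _
  unfold Spec_bigram_generation bigram_generation bigram_generation_alt
  exact main_chars packet_datagram.toList packet_len
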